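-- pv_equiv track=rewrite | github.com/pmcfadin/post-database-era | scripts/analysis/analyze_data_movement_interoperability.py | analyze_storage_patterns
-- ===== SOURCE A (Python) =====
-- def analyze_storage_patterns(data):
--     """Analyze hybrid storage pattern characteristics"""
--     analysis = {
--         'tiering_patterns': {},
--         'cache_performance': {},
--         'cost_optimizations': {},
--         'performance_improvements': {}
--     }
--
--     for record in data:
--         pattern_name = record.get('pattern_name', '')
--         optimization = record.get('optimization_strategy', '')
--
--         if pattern_name:
--             # Cache hit rates
--             hit_rate = record.get('cache_hit_rate', '')
--             if hit_rate:
--                 analysis['cache_performance'][pattern_name] = hit_rate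
--
--             # Performance improvements
--             perf_improvement = record.get('performance_improvement', '')
--             if perf_improvement:
--                 analysis['performance_improvements'][pattern_name] = perf_improvement
--
--             # Cost reduction
--             cost_reduction = record.get('cost_reduction', '')
--             if cost_reduction:
--                 analysis['tiering_patterns'][pattern_name] = cost_reduction
--
--         if optimization:
--             # Cost savings from optimizations
--             cost_savings = record.get('cost_savings', '')
--             if cost_savings:
--                 analysis['cost_optimizations'][optimization] = cost_savings
--
--     return analysis
-- ===== SOURCE B (Python) =====
-- def analyze_storage_patterns(data):
--     """Analyze hybrid storage pattern characteristics"""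
--     def pick(key_field, value_field):
--         return {r.get(key_field, ''): r.get(value_field, '')
--                 for r in data
--                 if r.get(key_field, '') and r.get(value_field, '')}
--     return {
--         'tiering_patterns': pick('pattern_name', 'cost_reduction'),
--         'cache_performance': pick('pattern_name', 'cache_hit_rate'),
--         'cost_optimizations': pick('optimization_strategy', 'cost_savings'),
--         'performance_improvements': pick('pattern_name', 'performance_improvement'),
--     }
-- ===== Notes on version B (the rewrite author's own statement) =====
-- stated objective: idiomatic
-- what changed: The single fused loop that mutates a nested dict is replaced by four independent filtered dict comprehensions (one pass per result table), assembled into the result dict.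
import Mathlib
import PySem

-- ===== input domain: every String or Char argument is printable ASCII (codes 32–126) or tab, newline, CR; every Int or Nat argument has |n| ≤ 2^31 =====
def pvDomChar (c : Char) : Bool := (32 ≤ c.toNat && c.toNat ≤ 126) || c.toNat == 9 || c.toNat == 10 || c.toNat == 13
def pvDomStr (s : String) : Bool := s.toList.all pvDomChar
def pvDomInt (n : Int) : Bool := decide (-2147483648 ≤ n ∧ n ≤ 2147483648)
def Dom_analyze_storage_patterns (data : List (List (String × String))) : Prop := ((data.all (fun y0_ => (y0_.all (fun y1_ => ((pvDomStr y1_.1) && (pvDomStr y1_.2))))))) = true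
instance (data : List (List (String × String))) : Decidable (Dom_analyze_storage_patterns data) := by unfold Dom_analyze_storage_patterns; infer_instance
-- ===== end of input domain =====

-- B replaces A's single fused loop over a mutated nested dict by four independent
-- filtered dict comprehensions, one per result table (objective: idiomatic).

-- ===== PORT A =====
-- record.get(k, '') : first-match lookup in the record's association list
def pvRecGet (r : List (String × String)) (k : String) : String :=
  (PySem.Dict.mk r).getD k ""

-- the loop body of A (one record), acting on the nested analysis dict
def pvStepA (a : PySem.Dict String (PySem.Dict String String))
    (r : List (String × String)) : PySem.Dict String (PySem.Dict String String) :=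
  let pattern_name := pvRecGet r "pattern_name"
  let optimization := pvRecGet r "optimization_strategy"
  let a :=
    if pattern_name ≠ "" then
      let hit_rate := pvRecGet r "cache_hit_rate"
      let a := if hit_rate ≠ "" then
          a.modify "cache_performance" PySem.Dict.empty (fun d => d.insert pattern_name hit_rate)
        else a
      let perf_improvement := pvRecGet r "performance_improvement"
      let a := if perf_improvement ≠ "" then
          a.modify "performance_improvements" PySem.Dict.empty (fun d => d.insert pattern_name perf_improvement)
        else a
      let cost_reduction := pvRecGet r "cost_reduction"
      if cost_reduction ≠ "" then
          a.modify "tiering_patterns" PySem.Dict.empty (fun d => d.insert pattern_name cost_reduction)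
        else a
    else a
  if optimization ≠ "" then
    let cost_savings := pvRecGet r "cost_savings"
    if cost_savings ≠ "" then
      a.modify "cost_optimizations" PySem.Dict.empty (fun d => d.insert optimization cost_savings)
    else a
  else a

def analyze_storage_patterns (data : List (List (String × String))) : List (String × List (String × String)) :=
  let analysis : PySem.Dict String (PySem.Dict String String) :=
    PySem.Dict.ofList [("tiering_patterns", PySem.Dict.empty), ("cache_performance", PySem.Dict.empty),
                       ("cost_optimizations", PySem.Dict.empty), ("performance_improvements", PySem.Dict.empty)]
  let analysis := data.foldl pvStepA analysis
  analysis.items.map (fun p => (p.1, p.2.items))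

-- ===== PORT B =====
-- one filtered dict comprehension: {r[kf]: r[vf] for r in data if r.get(kf,'') and r.get(vf,'')}
def pvPick (data : List (List (String × String))) (kf vf : String) : List (String × String) :=
  (data.foldl (fun d r =>
      if pvRecGet r kf ≠ "" ∧ pvRecGet r vf ≠ "" then
        d.insert (pvRecGet r kf) (pvRecGet r vf)
      else d)
    PySem.Dict.empty).items

def analyze_storage_patterns_alt (data : List (List (String × String))) : List (String × List (String × String)) :=
  [("tiering_patterns", pvPick data "pattern_name" "cost_reduction"),
   ("cache_performance", pvPick data "pattern_name" "cache_hit_rate"),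
   ("cost_optimizations", pvPick data "optimization_strategy" "cost_savings"),
   ("performance_improvements", pvPick data "pattern_name" "performance_improvement")]

-- ===== PRECONDITION & SPEC =====
def Spec_analyze_storage_patterns (data : List (List (String × String))) (out : List (String × List (String × String))) : Prop := out = analyze_storage_patterns_alt data
instance (data : List (List (String × String))) (out : List (String × List (String × String))) : Decidable (Spec_analyze_storage_patterns data out) := by unfold Spec_analyze_storage_patterns; infer_instance

-- ===== CLAIM (what is proved, stated in full; the proofs are below) =====
def Claim_equal_analyze_storage_patterns : Prop := ∀ (data : List (List (String × String))), Dom_analyze_storage_patterns data → Spec_analyze_storage_patterns data (analyze_storage_patterns data)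

-- ===== LEMMAS AND PROOFS =====

-- the nested analysis dict always has exactly these four keys, in creation order
def pvMkA (t c o p : PySem.Dict String String) : PySem.Dict String (PySem.Dict String String) :=
  PySem.Dict.mk [("tiering_patterns", t), ("cache_performance", c),
                 ("cost_optimizations", o), ("performance_improvements", p)]

-- B's per-record step for one (key-field, value-field) table
def pvStepB (kf vf : String) (d : PySem.Dict String String) (r : List (String × String)) : PySem.Dict String String :=
  if pvRecGet r kf ≠ "" ∧ pvRecGet r vf ≠ "" then
    d.insert (pvRecGet r kf) (pvRecGet r vf)
  else d

lemma pvModifyT (t c o p : PySem.Dict String String) (f : PySem.Dict String String → PySem.Dict String String) :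
    (pvMkA t c o p).modify "tiering_patterns" PySem.Dict.empty f = pvMkA (f t) c o p := by
  simp [pvMkA, PySem.Dict.modify, PySem.Dict.insert, PySem.Dict.contains, PySem.Dict.getD, PySem.Dict.get?]

lemma pvModifyC (t c o p : PySem.Dict String String) (f : PySem.Dict String String → PySem.Dict String String) :
    (pvMkA t c o p).modify "cache_performance" PySem.Dict.empty f = pvMkA t (f c) o p := by
  simp [pvMkA, PySem.Dict.modify, PySem.Dict.insert, PySem.Dict.contains, PySem.Dict.getD, PySem.Dict.get?]

lemma pvModifyO (t c o p : PySem.Dict String String) (f : PySem.Dict String String → PySem.Dict String String) :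
    (pvMkA t c o p).modify "cost_optimizations" PySem.Dict.empty f = pvMkA t c (f o) p := by
  simp [pvMkA, PySem.Dict.modify, PySem.Dict.insert, PySem.Dict.contains, PySem.Dict.getD, PySem.Dict.get?]

lemma pvModifyP (t c o p : PySem.Dict String String) (f : PySem.Dict String String → PySem.Dict String String) :
    (pvMkA t c o p).modify "performance_improvements" PySem.Dict.empty f = pvMkA t c o (f p) := by
  simp [pvMkA, PySem.Dict.modify, PySem.Dict.insert, PySem.Dict.contains, PySem.Dict.getD, PySem.Dict.get?]

lemma pvStepA_mkA (t c o p : PySem.Dict String String) (r : List (String × String)) :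
    pvStepA (pvMkA t c o p) r =
      pvMkA (pvStepB "pattern_name" "cost_reduction" t r)
            (pvStepB "pattern_name" "cache_hit_rate" c r)
            (pvStepB "optimization_strategy" "cost_savings" o r)
            (pvStepB "pattern_name" "performance_improvement" p r) := by
  simp only [pvStepA, pvStepB]
  by_cases h1 : pvRecGet r "pattern_name" = "" <;>
  by_cases h2 : pvRecGet r "cache_hit_rate" = "" <;>
  by_cases h3 : pvRecGet r "performance_improvement" = "" <;>
  by_cases h4 : pvRecGet r "cost_reduction" = "" <;>
  by_cases h5 : pvRecGet r "optimization_strategy" = "" <;>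
  by_cases h6 : pvRecGet r "cost_savings" = "" <;>
    simp [h1, h2, h3, h4, h5, h6, pvModifyT, pvModifyC, pvModifyO, pvModifyP]

lemma pvFoldA_mkA (data : List (List (String × String))) (t c o p : PySem.Dict String String) :
    data.foldl pvStepA (pvMkA t c o p) =
      pvMkA (data.foldl (pvStepB "pattern_name" "cost_reduction") t)
            (data.foldl (pvStepB "pattern_name" "cache_hit_rate") c)
            (data.foldl (pvStepB "optimization_strategy" "cost_savings") o)
            (data.foldl (pvStepB "pattern_name" "performance_improvement") p) := by
  induction data generalizing t c o p with
  | nil => rfl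
  | cons r rest ih => simp [List.foldl_cons, pvStepA_mkA, ih]

-- ===== VERDICT (by name: the statement is the Claim_ definition above) =====
theorem analyze_storage_patterns_spec : Claim_equal_analyze_storage_patterns := by
  intro data _
  show ((List.foldl pvStepA (pvMkA PySem.Dict.empty PySem.Dict.empty PySem.Dict.empty PySem.Dict.empty) data).items.map
      (fun p => (p.1, p.2.items))) = analyze_storage_patterns_alt data
  rw [pvFoldA_mkA]
  rfl
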